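-- pv_equiv track=rewrite | github.com/pypi-data/pypi-mirror-404 | packages/airbyte-agent-shopify/airbyte_agent_shopify-0.1.23-py3-none-any.whl/airbyte_agent_shopify/_vendored/connector_sdk/executor/local_executor.py | _convert_nested_field_to_graphql
-- ===== SOURCE A (Python) =====
-- def _convert_nested_field_to_graphql(field: str) -> str:
--     """Convert dot-notation field to GraphQL field selection.
--
--     Example: "primaryLanguage.name" -> "primaryLanguage { name }"
--
--     Args:
--         field: Field name in dot notation (e.g., "primaryLanguage.name")
--
--     Returns:
--         GraphQL field selection string
--     """
--     if "." not in field: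
--         return field
--
--     parts = field.split(".")
--     result = parts[0]
--     for part in parts[1:]:
--         result += f" {{ {part}"
--     result += " }" * (len(parts) - 1)
--     return result
-- ===== SOURCE B (Python) =====
-- def _convert_nested_field_to_graphql(field: str) -> str:
--     """Convert dot-notation field to GraphQL field selection, recursively on the first dot."""
--     i = field.find(".")
--     if i == -1:
--         return field
--     return f"{field[:i]} {{ {_convert_nested_field_to_graphql(field[i + 1:])} }}"
-- ===== Notes on version B (the rewrite author's own statement) =====
-- stated objective: alternative
-- what changed: Replaces A's split-on-all-dots forward loop (append ' { part' per part, then a run of closing braces) with a recursion that splits off only the first dot (find + slice) and wraps the recursive result, building the nesting inside-out.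
import Mathlib
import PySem

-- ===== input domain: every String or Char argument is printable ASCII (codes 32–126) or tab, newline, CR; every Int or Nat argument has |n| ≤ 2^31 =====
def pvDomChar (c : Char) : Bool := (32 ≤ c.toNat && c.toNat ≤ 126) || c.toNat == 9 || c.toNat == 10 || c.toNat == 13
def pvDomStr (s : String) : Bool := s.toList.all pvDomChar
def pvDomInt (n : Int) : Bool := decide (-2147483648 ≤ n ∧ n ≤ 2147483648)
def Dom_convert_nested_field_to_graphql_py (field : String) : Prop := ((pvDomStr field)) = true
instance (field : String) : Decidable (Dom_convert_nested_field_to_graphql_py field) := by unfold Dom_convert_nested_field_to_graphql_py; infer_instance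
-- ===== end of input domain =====

-- B replaces A's split-on-all-dots loop (then a run of closing braces) with a recursion on the
-- first dot that wraps the recursive result; same cost, different decomposition (objective: alternative).

-- ===== PORT A =====
-- literal port of A: split on ".", fold appending " { part", then append " }" * (len(parts)-1)
def convert_nested_field_to_graphql_py (field : String) : String :=
  if PySem.Str.isIn "." field = false then field
  else
    let parts := PySem.Chars.splitOn field.toList ".".toList
    match parts with
    | [] => field  -- unreachable: Python split never returns an empty list
    | p0 :: rest =>
      String.ofList ((rest.foldl (fun acc part => acc ++ (" { ".toList ++ part)) p0)
        ++ PySem.List.pyRepeat " }".toList ((parts.length : Int) - 1))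

-- ===== PORT B =====
-- termination helper: the slice after the first dot is strictly shorter
theorem pvAltSliceLt (cs : List Char) (h : ¬ PySem.Chars.find cs ['.'] = -1) :
    (PySem.List.slice cs (some (PySem.Chars.find cs ['.'] + 1)) none).length < cs.length := by
  have hle := PySem.Chars.neg_one_le_find cs ['.']
  have hpos : 0 ≤ PySem.Chars.find cs ['.'] := by omega
  have hin : ['.'] <:+: cs := (PySem.Chars.find_ne_neg_one_iff cs ['.']).mp h
  have hne : cs ≠ [] := by
    intro hnil; subst hnil
    have := List.eq_nil_of_infix_nil hin; simp at this
  rw [PySem.List.slice_from cs (by omega : (0:Int) ≤ PySem.Chars.find cs ['.'] + 1)]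
  have : ((PySem.Chars.find cs ['.'] + 1)).toNat ≥ 1 := by omega
  have hlen : 0 < cs.length := List.length_pos_of_ne_nil hne
  simp only [List.length_drop]
  omega

-- literal port of B's recursion: find the first dot, wrap "head { rec(rest) }"
def convert_nested_field_to_graphql_py_altGo (cs : List Char) : List Char :=
  let i := PySem.Chars.find cs ['.']
  if h : i = -1 then cs
  else
    PySem.List.slice cs none (some i) ++ " { ".toList
      ++ convert_nested_field_to_graphql_py_altGo (PySem.List.slice cs (some (i + 1)) none)
      ++ " }".toList
termination_by cs.length
decreasing_by exact pvAltSliceLt cs h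

def convert_nested_field_to_graphql_py_alt (field : String) : String :=
  String.ofList (convert_nested_field_to_graphql_py_altGo field.toList)

-- ===== PRECONDITION & SPEC =====
def Spec_convert_nested_field_to_graphql_py (field : String) (out : String) : Prop := out = convert_nested_field_to_graphql_py_alt field
instance (field : String) (out : String) : Decidable (Spec_convert_nested_field_to_graphql_py field out) := by unfold Spec_convert_nested_field_to_graphql_py; infer_instance

-- ===== CLAIM (what is proved, stated in full; the proofs are below) =====
def Claim_equal_convert_nested_field_to_graphql_py : Prop := ∀ (field : String), Dom_convert_nested_field_to_graphql_py field → Spec_convert_nested_field_to_graphql_py field (convert_nested_field_to_graphql_py field)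

-- ===== LEMMAS AND PROOFS =====

-- simple model of Python split('.'): first chunk and remaining chunks
def pvSp : List Char → List Char × List (List Char)
  | [] => ([], [])
  | c :: rest =>
      if c = '.' then ([], (pvSp rest).1 :: (pvSp rest).2)
      else (c :: (pvSp rest).1, (pvSp rest).2)

theorem pvGo_spec (fuel : Nat) (l cur : List Char) (acc : List (List Char))
    (hf : l.length ≤ fuel) :
    PySem.Chars.splitOn.go ['.'] fuel l cur acc
      = acc.reverse ++ (cur.reverse ++ (pvSp l).1) :: (pvSp l).2 := by
  induction fuel generalizing l cur acc with
  | zero =>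
    have hl : l = [] := by cases l <;> simp_all
    subst hl
    rw [PySem.Chars.splitOn.go.eq_def]; simp [pvSp]
  | succ n ih =>
    cases l with
    | nil => rw [PySem.Chars.splitOn.go.eq_def]; simp [pvSp]
    | cons c rest =>
      rw [PySem.Chars.splitOn.go.eq_def]
      by_cases hc : c = '.'
      · subst hc
        simp only [List.isPrefixOf, beq_self_eq_true, Bool.true_and, if_true]
        rw [show List.drop (['.'] : List Char).length ('.' :: rest) = rest from rfl]
        rw [ih rest [] _ (by simp at hf; omega)]
        simp [pvSp]
      · have hp : List.isPrefixOf ['.'] (c :: rest) = false := by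
          simp [List.isPrefixOf]
          exact fun h => absurd h.symm hc
        simp only [hp, Bool.false_eq_true, if_false]
        rw [ih rest (c :: cur) _ (by simp at hf; omega)]
        simp [pvSp, hc]

theorem pvSplitOn_eq (cs : List Char) :
    PySem.Chars.splitOn cs ['.'] = (pvSp cs).1 :: (pvSp cs).2 := by
  rw [show PySem.Chars.splitOn cs ['.'] = PySem.Chars.splitOn.go ['.'] (cs.length + 1) cs [] [] from rfl]
  rw [pvGo_spec (cs.length + 1) cs [] [] (by omega)]
  simp

-- nested building from parts (B's shape)
def pvBuild (p : List Char) : List (List Char) → List Char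
  | [] => p
  | q :: qs => p ++ " { ".toList ++ pvBuild q qs ++ " }".toList

theorem pvFoldPrefix (x y : List Char) (l : List (List Char)) :
    l.foldl (fun acc part => acc ++ (" { ".toList ++ part)) (x ++ y)
      = x ++ l.foldl (fun acc part => acc ++ (" { ".toList ++ part)) y := by
  induction l generalizing y with
  | nil => simp
  | cons a as ih => simp only [List.foldl_cons, List.append_assoc, ih]

theorem pvRepeatSucc (xs : List Char) (n : Nat) :
    PySem.List.pyRepeat xs ((n : Int) + 1) = PySem.List.pyRepeat xs (n : Int) ++ xs := by
  simp only [PySem.List.pyRepeat]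
  rw [show ((n : Int) + 1).toNat = n + 1 by omega, show ((n : Int)).toNat = n by omega]
  rw [List.replicate_succ' (n := n)]
  simp

theorem pvFold_eq_build (p : List Char) (ps : List (List Char)) :
    (ps.foldl (fun acc part => acc ++ (" { ".toList ++ part)) p)
      ++ PySem.List.pyRepeat " }".toList (ps.length : Int)
      = pvBuild p ps := by
  induction ps generalizing p with
  | nil => simp [pvBuild, PySem.List.pyRepeat]
  | cons q qs ih =>
    simp only [List.foldl_cons, pvBuild, List.length_cons]
    rw [pvFoldPrefix, pvFoldPrefix]
    push_cast
    rw [pvRepeatSucc]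
    have h2 : (qs.foldl (fun acc part => acc ++ (" { ".toList ++ part)) q)
        ++ (PySem.List.pyRepeat " }".toList (qs.length : Int) ++ " }".toList)
        = pvBuild q qs ++ " }".toList := by
      rw [← List.append_assoc, ih q]
    simp only [show (" { ".toList : List Char) = [' ', '{', ' '] from rfl,
      show (" }".toList : List Char) = [' ', '}'] from rfl] at h2 ⊢
    simp only [List.append_assoc, h2]

theorem pvSp_no_dot (cs : List Char) (h : '.' ∉ cs) : pvSp cs = (cs, []) := by
  induction cs with
  | nil => simp [pvSp]
  | cons c rest ih =>
    simp only [List.mem_cons, not_or] at h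
    simp [pvSp, Ne.symm h.1, ih h.2]

theorem pvSp_dot (h r : List Char) (hh : '.' ∉ h) :
    pvSp (h ++ '.' :: r) = ([] ++ h, (pvSp r).1 :: (pvSp r).2) := by
  induction h with
  | nil => simp [pvSp]
  | cons c cs ih =>
    simp only [List.mem_cons, not_or] at hh
    simp [pvSp, Ne.symm hh.1, ih hh.2]

theorem pvAltGo_build (cs : List Char) :
    convert_nested_field_to_graphql_py_altGo cs = pvBuild (pvSp cs).1 (pvSp cs).2 := by
  suffices H : ∀ (n : Nat) (cs : List Char), cs.length ≤ n →
      convert_nested_field_to_graphql_py_altGo cs = pvBuild (pvSp cs).1 (pvSp cs).2 from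
    H cs.length cs le_rfl
  intro n
  induction n with
  | zero =>
    intro cs hlen
    have hnil : cs = [] := by cases cs <;> simp_all
    subst hnil
    rw [convert_nested_field_to_graphql_py_altGo]
    simp [pvSp, pvBuild, show PySem.Chars.find [] ['.'] = -1 from by decide]
  | succ m ih =>
    intro cs hlen
    rw [convert_nested_field_to_graphql_py_altGo]
    by_cases hfind : PySem.Chars.find cs ['.'] = -1
    · have hnd : '.' ∉ cs := by
        have := (PySem.Chars.find_eq_neg_one_iff cs ['.']).mp hfind
        intro hmem
        obtain ⟨s₁, s₂, hsplit⟩ := List.append_of_mem hmem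
        exact this ⟨s₁, s₂, by simp [hsplit]⟩
      simp only [hfind]
      rw [pvSp_no_dot cs hnd]
      simp [pvBuild]
    · set i := PySem.Chars.find cs ['.'] with hi
      have hpos : 0 ≤ i := by
        have := PySem.Chars.neg_one_le_find cs ['.']
        omega
      obtain ⟨hpre, hmin⟩ := PySem.Chars.find_spec hpos
      set k := i.toNat with hk
      have hklt : k < cs.length := by
        have hle := PySem.Chars.find_le_length cs ['.']
        rcases Nat.lt_or_ge k cs.length with h | h
        · exact h
        · exfalso
          have hdropnil : cs.drop k = [] := List.drop_eq_nil_of_le h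
          rw [hdropnil] at hpre
          exact absurd (List.prefix_nil.mp hpre) (by simp)
      have hhead : cs.drop k = '.' :: cs.drop (k + 1) := by
        obtain ⟨t, ht⟩ := hpre
        rw [show cs.drop (k + 1) = (cs.drop k).drop 1 by rw [List.drop_drop]]
        rw [← ht]
        simp
      have hsplit : cs = cs.take k ++ '.' :: cs.drop (k + 1) := by
        conv_lhs => rw [← List.take_append_drop k cs]
        rw [hhead]
      have hnd : '.' ∉ cs.take k := by
        intro hmem
        obtain ⟨j, hj, hget⟩ := List.mem_iff_getElem.mp hmem
        have hjk : j < k := by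
          have := List.length_take_le k cs
          omega
        have hjcs : j < cs.length := by omega
        apply hmin j hjk
        rw [List.drop_eq_getElem_cons hjcs]
        refine ⟨cs.drop (j + 1), ?_⟩
        have hcj : cs[j] = '.' := by
          rw [List.getElem_take] at hget
          exact hget
        simp [hcj]
      simp only [dif_neg hfind]
      rw [PySem.List.slice_to cs hpos, PySem.List.slice_from cs (by omega : (0:Int) ≤ i + 1)]
      rw [show (i + 1).toNat = k + 1 by omega]
      have hrlen : (cs.drop (k + 1)).length ≤ m := by
        simp only [List.length_drop]
        omega
      rw [ih _ hrlen]
      conv_lhs => rw [show cs.take k = cs.take i.toNat from rfl]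
      rw [show pvSp cs = ([] ++ cs.take k, (pvSp (cs.drop (k + 1))).1 :: (pvSp (cs.drop (k + 1))).2) by
        conv_lhs => rw [hsplit]
        exact pvSp_dot _ _ hnd]
      simp [pvBuild]
      omega

-- ===== VERDICT (by name: the statement is the Claim_ definition above) =====
theorem convert_nested_field_to_graphql_py_spec : Claim_equal_convert_nested_field_to_graphql_py := by
  intro field _
  unfold Spec_convert_nested_field_to_graphql_py
  unfold convert_nested_field_to_graphql_py convert_nested_field_to_graphql_py_alt
  by_cases hin : PySem.Str.isIn "." field = false
  · rw [if_pos hin]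
    have hninf : ¬ (".".toList <:+: field.toList) := by
      intro hinf
      have ht := (PySem.Str.isIn_iff_infix "." field).mpr hinf
      rw [ht] at hin
      cases hin
    have hfind : PySem.Chars.find field.toList ['.'] = -1 :=
      (PySem.Chars.find_eq_neg_one_iff _ _).mpr hninf
    rw [convert_nested_field_to_graphql_py_altGo, dif_pos hfind]
    exact String.ofList_toList.symm
  · rw [if_neg hin]
    rw [show ("." : String).toList = ['.'] from rfl, pvSplitOn_eq]
    simp only []
    rw [pvAltGo_build]
    congr 1
    have hlen : ((((pvSp field.toList).1 :: (pvSp field.toList).2).length : Int) - 1)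
        = ((pvSp field.toList).2.length : Int) := by
      simp
    rw [hlen, pvFold_eq_build]
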